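-- pv_equiv track=rewrite | github.com/LicFran/Practicons | src/utils.py | _sort_cells
-- ===== SOURCE A (Python) =====
-- from typing import List, Dict, Any, Tuple, Optional
--
-- def _sort_cells(cells: List[Tuple[int, int, int, int]]) -> List[List[Tuple[int, int, int, int]]]:
--     """
--     Ordena celdas por fila y columna
--
--     Args:
--         cells (List[Tuple[int, int, int, int]]): Lista de celdas como (x, y, w, h)
--
--     Returns:
--         List[List[Tuple[int, int, int, int]]]: Celdas organizadas por fila y columna
--     """
--     # Obtiene coordenadas y para todas las celdas
--     y_coords = sorted(set([cell[1] for cell in cells]))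
--
--     # Agrupa celdas por fila
--     rows = []
--     for y in y_coords:
--         # Obtiene todas las celdas en esta fila
--         row_cells = [cell for cell in cells if abs(cell[1] - y) < 10]
--
--         # Ordena celdas en esta fila por coordenada x
--         row_cells.sort(key=lambda cell: cell[0])
--
--         rows.append(row_cells)
--
--     return rows
-- ===== SOURCE B (Python) =====
-- from typing import List, Tuple
--
-- def _bisect_left(a, x):
--     # standard bisect_left loop (A imports no stdlib modules, so 'bisect' is not imported)
--     lo, hi = 0, len(a)
--     while lo < hi:
--         mid = (lo + hi) // 2
--         if a[mid] < x:
--             lo = mid + 1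
--         else:
--             hi = mid
--     return lo
--
-- def _sort_cells(cells: List[Tuple[int, int, int, int]]) -> List[List[Tuple[int, int, int, int]]]:
--     # Inverted loop: one pass over the x-sorted cells, scattering each cell into the
--     # contiguous block of fuzzy y-rows it belongs to (found by binary search on the
--     # sorted unique y's).  |cy - y| < 10 over ints means cy-9 <= y <= cy+9.
--     ys = sorted({c[1] for c in cells})
--     buckets = [[] for _ in ys]
--     for c in sorted(cells, key=lambda c: c[0]):
--         lo = _bisect_left(ys, c[1] - 9)
--         hi = _bisect_left(ys, c[1] + 10)
--         for k in range(lo, hi):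
--             buckets[k].append(c)
--     return buckets
-- ===== Notes on version B (the rewrite author's own statement) =====
-- stated objective: faster
-- what changed: B inverts the loops: instead of A's per-unique-y full scan and per-row sort, it sorts the cells by x once, then scatters each cell into the contiguous block of fuzzy y-row buckets it belongs to, located by binary search on the sorted unique y's.
import Mathlib
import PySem

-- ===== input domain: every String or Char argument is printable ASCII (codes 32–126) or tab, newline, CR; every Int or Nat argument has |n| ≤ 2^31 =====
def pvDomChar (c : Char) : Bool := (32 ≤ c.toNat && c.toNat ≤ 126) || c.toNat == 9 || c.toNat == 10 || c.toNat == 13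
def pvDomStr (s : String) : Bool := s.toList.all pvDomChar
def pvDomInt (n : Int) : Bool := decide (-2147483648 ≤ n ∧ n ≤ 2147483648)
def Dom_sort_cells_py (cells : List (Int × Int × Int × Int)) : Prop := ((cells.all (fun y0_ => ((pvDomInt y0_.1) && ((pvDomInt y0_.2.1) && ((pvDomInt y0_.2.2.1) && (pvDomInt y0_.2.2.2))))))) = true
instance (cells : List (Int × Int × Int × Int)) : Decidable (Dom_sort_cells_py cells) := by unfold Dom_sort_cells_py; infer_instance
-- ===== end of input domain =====

-- B inverts A's loops: it sorts the cells by x once and scatters each cell into the contiguous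
-- block of fuzzy y-row buckets it belongs to, located by binary search on the sorted unique y's
-- (faster in a timing run; A rescans and sorts per unique y).

-- ===== PORT A =====
def sort_cells_py (cells : List (Int × Int × Int × Int)) : List (List (Int × Int × Int × Int)) :=
  -- y_coords = sorted(set([cell[1] for cell in cells]))
  let y_coords := PySem.List.sorted (PySem.Set.ofList (cells.map (fun cell => cell.2.1))) (fun y => y) false
  -- for y in y_coords: rows.append(sorted row of cells with |cell[1] - y| < 10)
  y_coords.foldl (fun rows y =>
    rows ++ [PySem.List.sorted (cells.filter (fun cell => decide (|cell.2.1 - y| < 10)))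
               (fun cell => cell.1) false]) []

-- ===== PORT B =====
-- Source B's hand-written _bisect_left is the standard bisect_left lo/hi midpoint loop
-- (A imports no stdlib modules, so Source B may not import bisect); it is ported as the
-- prelude's primitive for that loop, PySem.List.bisectLeft.
def sort_cells_py_alt (cells : List (Int × Int × Int × Int)) : List (List (Int × Int × Int × Int)) :=
  -- ys = sorted({c[1] for c in cells})
  let ys := PySem.List.sorted (PySem.Set.ofList (cells.map (fun c => c.2.1))) (fun y => y) false
  -- buckets = [[] for _ in ys]
  let buckets := ys.map (fun _ => ([] : List (Int × Int × Int × Int)))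
  -- for c in sorted(cells, key=lambda c: c[0]): scatter c into buckets[lo:hi]
  (PySem.List.sorted cells (fun c => c.1) false).foldl (fun bs c =>
    (List.range' (PySem.List.bisectLeft ys (c.2.1 - 9))
        (PySem.List.bisectLeft ys (c.2.1 + 10) - PySem.List.bisectLeft ys (c.2.1 - 9))).foldl
      (fun bs k => bs.set k (bs.getD k [] ++ [c])) bs) buckets

-- ===== PRECONDITION & SPEC =====
def Spec_sort_cells_py (cells : List (Int × Int × Int × Int)) (out : List (List (Int × Int × Int × Int))) : Prop := out = sort_cells_py_alt cells
instance (cells : List (Int × Int × Int × Int)) (out : List (List (Int × Int × Int × Int))) : Decidable (Spec_sort_cells_py cells out) := by unfold Spec_sort_cells_py; infer_instance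

-- ===== CLAIM (what is proved, stated in full; the proofs are below) =====
def Claim_equal_sort_cells_py : Prop := ∀ (cells : List (Int × Int × Int × Int)), Dom_sort_cells_py cells → Spec_sort_cells_py cells (sort_cells_py cells)

-- ===== LEMMAS AND PROOFS =====

-- insertBy puts x in front when it goes before every element
theorem insertBy_of_forall_before {α : Type} (before : α → α → Bool) (x : α) (l : List α)
    (h : ∀ y ∈ l, before x y = true) : PySem.List.insertBy before x l = x :: l := by
  cases l with
  | nil => simp [PySem.List.insertBy]
  | cons y t => simp [PySem.List.insertBy, h y (by simp)]

-- insertion into a key-sorted list stays key-sorted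
theorem insertBy_key_pairwise {α κ : Type} [LinearOrder κ] (key : α → κ) (x : α) (ys : List α)
    (h : ys.Pairwise (fun a b => key a ≤ key b)) :
    (PySem.List.insertBy (fun a b => decide (key a < key b)) x ys).Pairwise (fun a b => key a ≤ key b) := by
  induction ys with
  | nil => simp [PySem.List.insertBy]
  | cons y t ih =>
    rcases List.pairwise_cons.1 h with ⟨hy, ht⟩
    by_cases hlt : key x < key y
    · simp only [PySem.List.insertBy, hlt, decide_true, if_pos]
      refine List.pairwise_cons.2 ⟨?_, h⟩
      intro b hb
      rcases List.mem_cons.1 hb with rfl | hb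
      · exact le_of_lt hlt
      · exact le_of_lt (lt_of_lt_of_le hlt (hy b hb))
    · simp only [PySem.List.insertBy, hlt, decide_false, if_neg, Bool.false_eq_true,
        not_false_eq_true]
      refine List.pairwise_cons.2 ⟨?_, ih ht⟩
      intro b hb
      rcases (PySem.List.mem_insertBy _ _ _ _).1 hb with rfl | hb
      · exact le_of_not_gt hlt
      · exact hy b hb

-- filtering commutes with inserting into a key-sorted list
theorem filter_insertBy {α κ : Type} [LinearOrder κ] (key : α → κ) (p : α → Bool) (x : α) (ys : List α)
    (h : ys.Pairwise (fun a b => key a ≤ key b)) :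
    (PySem.List.insertBy (fun a b => decide (key a < key b)) x ys).filter p =
      if p x then PySem.List.insertBy (fun a b => decide (key a < key b)) x (ys.filter p)
      else ys.filter p := by
  induction ys with
  | nil => cases hp : p x <;> simp [PySem.List.insertBy, hp]
  | cons y t ih =>
    rcases List.pairwise_cons.1 h with ⟨hy, ht⟩
    by_cases hlt : key x < key y
    · cases hp : p x with
      | false => simp [PySem.List.insertBy, hlt, List.filter_cons, hp]
      | true =>
        cases hpy : p y with
        | true => simp [PySem.List.insertBy, hlt, hp, hpy]
        | false =>
          simp only [PySem.List.insertBy, hlt, decide_true, if_true, List.filter_cons, hp, hpy,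
            Bool.false_eq_true, if_false]
          exact (insertBy_of_forall_before _ x (t.filter p) (fun z hz =>
            decide_eq_true (lt_of_lt_of_le hlt (hy z (List.mem_of_mem_filter hz))))).symm
    · simp only [PySem.List.insertBy, hlt, decide_false, Bool.false_eq_true, if_neg,
        not_false_eq_true]
      cases hp : p x with
      | false =>
        simp only [hp, Bool.false_eq_true, if_neg, not_false_eq_true] at ih ⊢
        cases hpy : p y <;> simp [hpy, ih ht]
      | true =>
        simp only [hp, if_pos] at ih ⊢
        cases hpy : p y with
        | true =>
          simp only [List.filter_cons, hpy, ite_true, PySem.List.insertBy, hlt, decide_false,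
            Bool.false_eq_true, if_neg, not_false_eq_true, ih ht]
        | false =>
          simp only [List.filter_cons, hpy, Bool.false_eq_true, ite_false, ih ht]

-- filtering commutes with the insertion-sort fold
theorem filter_foldl_insertBy {α κ : Type} [LinearOrder κ] (key : α → κ) (p : α → Bool) :
    ∀ (xs acc : List α), acc.Pairwise (fun a b => key a ≤ key b) →
    (xs.foldl (fun acc x => PySem.List.insertBy (fun a b => decide (key a < key b)) x acc) acc).filter p =
      (xs.filter p).foldl (fun acc x => PySem.List.insertBy (fun a b => decide (key a < key b)) x acc)
        (acc.filter p)
  | [], acc, _ => rfl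
  | x :: xs, acc, h => by
    simp only [List.foldl_cons]
    rw [filter_foldl_insertBy key p xs _ (insertBy_key_pairwise key x acc h)]
    cases hp : p x with
    | true =>
      rw [List.filter_cons_of_pos (by simp [hp]), List.foldl_cons, filter_insertBy key p x acc h,
        if_pos hp]
    | false =>
      rw [List.filter_cons_of_neg (by simp [hp]), filter_insertBy key p x acc h, if_neg (by simp [hp])]

-- filtering a stable sort = sorting the filtered list
theorem filter_sorted {α κ : Type} [LinearOrder κ] (key : α → κ) (p : α → Bool) (xs : List α) :
    (PySem.List.sorted xs key false).filter p = PySem.List.sorted (xs.filter p) key false := by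
  rw [PySem.List.sorted_eq_foldl_insertBy, PySem.List.sorted_eq_foldl_insertBy]
  simpa using filter_foldl_insertBy key p xs [] (by simp)

-- bisectLeft brackets: an index k lies in [bisectLeft v, bisectLeft w) iff ys[k] is in [v, w)
theorem bisect_window (ys : List Int) (hs : ys.Pairwise (fun a b => a ≤ b)) (v w : Int)
    (k : Nat) (hk : k < ys.length) :
    (PySem.List.bisectLeft ys v ≤ k ∧ k < PySem.List.bisectLeft ys w) ↔ (v ≤ ys[k] ∧ ys[k] < w) := by
  obtain ⟨_, hv2, hv3⟩ := PySem.List.bisectLeft_spec ys v hs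
  obtain ⟨_, hw2, hw3⟩ := PySem.List.bisectLeft_spec ys w hs
  constructor
  · rintro ⟨h1, h2⟩
    exact ⟨hv3 k hk h1, hw2 k hk h2⟩
  · rintro ⟨h1, h2⟩
    constructor
    · by_contra h
      exact absurd h1 (not_le.2 (hv2 k hk (by omega)))
    · by_contra h
      exact absurd h2 (not_lt.2 (hw3 k hk (by omega)))

-- the inner scatter loop: appending c to every bucket whose index is in `is`
theorem inner_scatter_getD (c : Int × Int × Int × Int) :
    ∀ (is : List Nat) (bs : List (List (Int × Int × Int × Int))) (k : Nat),
    (∀ i ∈ is, i < bs.length) → is.Nodup →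
    (is.foldl (fun bs k => bs.set k (bs.getD k [] ++ [c])) bs).getD k [] =
      if k ∈ is then bs.getD k [] ++ [c] else bs.getD k []
  | [], bs, k, _, _ => by simp
  | i :: t, bs, k, hlen, hnd => by
    have hi : i < bs.length := hlen i (by simp)
    have ht : ∀ j ∈ t, j < (bs.set i (bs.getD i [] ++ [c])).length := by
      intro j hj; simpa using hlen j (by simp [hj])
    rcases List.nodup_cons.1 hnd with ⟨hit, hndt⟩
    rw [List.foldl_cons, inner_scatter_getD c t _ k ht hndt]
    by_cases hk : k = i
    · subst hk
      simp [hit, List.getD, List.getElem?_set_self hi]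
    · have hset : (bs.set i (bs.getD i [] ++ [c])).getD k [] = bs.getD k [] := by
        simp [List.getD, List.getElem?_set_ne (fun h => hk h.symm)]
      rw [hset]
      simp [List.mem_cons, hk]

theorem inner_scatter_length (c : Int × Int × Int × Int) (is : List Nat)
    (bs : List (List (Int × Int × Int × Int))) :
    (is.foldl (fun bs k => bs.set k (bs.getD k [] ++ [c])) bs).length = bs.length := by
  induction is generalizing bs with
  | nil => rfl
  | cons i t ih => rw [List.foldl_cons, ih, List.length_set]

-- the outer pass: bucket k ends up with exactly the cells whose window covers ys[k], in pass order
theorem outer_scatter_getD (ys : List Int) (hs : ys.Pairwise (fun a b => a ≤ b))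
    (cs : List (Int × Int × Int × Int)) :
    ∀ (bs : List (List (Int × Int × Int × Int))),
    bs.length = ys.length → ∀ (k : Nat) (hk : k < ys.length),
    (cs.foldl (fun bs c =>
        (List.range' (PySem.List.bisectLeft ys (c.2.1 - 9))
            (PySem.List.bisectLeft ys (c.2.1 + 10) - PySem.List.bisectLeft ys (c.2.1 - 9))).foldl
          (fun bs k => bs.set k (bs.getD k [] ++ [c])) bs) bs).getD k [] =
      bs.getD k [] ++ cs.filter (fun c => decide (c.2.1 - 9 ≤ ys[k] ∧ ys[k] < c.2.1 + 10)) := by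
  induction cs with
  | nil => intro bs _ k _; simp
  | cons c cs ih =>
    intro bs hblen k hk
    have hhi : PySem.List.bisectLeft ys (c.2.1 + 10) ≤ ys.length :=
      (PySem.List.bisectLeft_spec ys (c.2.1 + 10) hs).1
    have hmem : ∀ j, (j ∈ List.range' (PySem.List.bisectLeft ys (c.2.1 - 9))
        (PySem.List.bisectLeft ys (c.2.1 + 10) - PySem.List.bisectLeft ys (c.2.1 - 9))) ↔
        (PySem.List.bisectLeft ys (c.2.1 - 9) ≤ j ∧ j < PySem.List.bisectLeft ys (c.2.1 + 10)) := by
      intro j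
      rw [List.mem_range'_1]
      omega
    have hinner := inner_scatter_getD c
      (List.range' (PySem.List.bisectLeft ys (c.2.1 - 9))
        (PySem.List.bisectLeft ys (c.2.1 + 10) - PySem.List.bisectLeft ys (c.2.1 - 9)))
      bs k
      (by intro i hi; have := (hmem i).1 hi; omega)
      (List.nodup_range' 1)
    rw [List.foldl_cons,
      ih _ (by rw [inner_scatter_length]; exact hblen) k hk, hinner, List.filter_cons]
    have hwin := bisect_window ys hs (c.2.1 - 9) (c.2.1 + 10) k (by omega)
    by_cases hw : c.2.1 - 9 ≤ ys[k] ∧ ys[k] < c.2.1 + 10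
    · rw [if_pos ((hmem k).2 (hwin.2 hw)), if_pos (by simpa using hw)]
      simp
    · rw [if_neg (fun hmem2 => hw (hwin.1 ((hmem k).1 hmem2))), if_neg (by simpa using hw)]

-- the scatter pass preserves the number of buckets
theorem outer_scatter_length (ys : List Int) (cs : List (Int × Int × Int × Int))
    (bs : List (List (Int × Int × Int × Int))) :
    (cs.foldl (fun bs c =>
        (List.range' (PySem.List.bisectLeft ys (c.2.1 - 9))
            (PySem.List.bisectLeft ys (c.2.1 + 10) - PySem.List.bisectLeft ys (c.2.1 - 9))).foldl
          (fun bs k => bs.set k (bs.getD k [] ++ [c])) bs) bs).length = bs.length := by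
  induction cs generalizing bs with
  | nil => rfl
  | cons c cs ih => rw [List.foldl_cons, ih, inner_scatter_length]

-- ===== VERDICT (by name: the statement is the Claim_ definition above) =====
set_option maxHeartbeats 1000000 in
theorem sort_cells_py_spec : Claim_equal_sort_cells_py := by
  intro cells _
  unfold Spec_sort_cells_py
  simp only [sort_cells_py, sort_cells_py_alt]
  rw [PySem.List.foldl_append_singleton_eq_map, List.nil_append]
  have hlt := PySem.List.sorted_ofList_pairwise_lt (cells.map (fun cell => cell.2.1))
  set ys := PySem.List.sorted (PySem.Set.ofList (cells.map (fun cell => cell.2.1))) (fun y => y) false with hys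
  have hs : ys.Pairwise (fun a b => a ≤ b) := hlt.imp le_of_lt
  have hlen0 : (ys.map (fun _ => ([] : List (Int × Int × Int × Int)))).length = ys.length := by simp
  apply List.ext_getElem
  · rw [List.length_map, outer_scatter_length, List.length_map]
  · intro k hk1 hk2
    have hk : k < ys.length := by simpa using hk1
    have hgd := outer_scatter_getD ys hs (PySem.List.sorted cells (fun c => c.1) false)
      (ys.map (fun _ => ([] : List (Int × Int × Int × Int)))) hlen0 k hk
    rw [List.getElem_map]
    rw [← List.getD_eq_getElem _ [] hk2, hgd]
    have h0 : (ys.map (fun _ => ([] : List (Int × Int × Int × Int)))).getD k [] = [] := by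
      rw [List.getD_eq_getElem _ [] (by simpa using hk), List.getElem_map]
    rw [h0, List.nil_append]
    rw [List.filter_congr (l := PySem.List.sorted cells (fun c => c.1) false)
      (q := fun cell => decide (|cell.2.1 - ys[k]| < 10)) ?_]
    · exact (filter_sorted (fun c => c.1) (fun cell => decide (|cell.2.1 - ys[k]| < 10)) cells).symm
    · intro c _
      simp only [decide_eq_decide, abs_lt]
      omega
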